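-- pv_equiv track=rewrite | github.com/wanghl21/PrivacyRAG | src/training/utils.py | find_matched_index
-- ===== SOURCE A (Python) =====
-- def find_matched_index(main_seq, sub_seq):
--     """
--     Find the last index where a subsequence appears within a main sequence.
--
--     This function searches through a main sequence to find the last occurrence
--     of a subsequence, useful for token matching in text processing.
--
--     Args:
--         main_seq: The main sequence to search within
--         sub_seq: The subsequence to find
--
--     Returns:
--         int: The last index where sub_seq starts in main_seq, or -1 if not found
--     """
--     # Validate inputs are not empty
--     assert len(sub_seq)>0 and len(main_seq)>0, f"the input should not be empty, however {sub_seq=}\n {main_seq=}"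
--     main_len = len(main_seq)
--     sub_len = len(sub_seq)
--
--     # Early exit if sub_seq is longer than main_seq
--     if sub_len > main_len:
--         return -1
--
--     # Variable to keep track of the last index of a match
--     last_index = -1
--
--     # Iterate through main_seq to find sub_seq
--     for i in range(main_len - sub_len + 1):
--         # Check if the slice of main_seq matches sub_seq
--         if main_seq[i:i+sub_len] == sub_seq:
--             # Update the last_index to the current position
--             last_index = i
--
--     # Return the last index found or -1 if not found
--     return last_index
-- ===== SOURCE B (Python) =====
-- def find_matched_index(main_seq, sub_seq):
--     n, m = len(main_seq), len(sub_seq)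
--     if m > n:
--         return -1
--     # Column-wise candidate elimination: start from every possible start position
--     # and prune, one pattern position at a time, the starts that disagree there.
--     candidates = list(range(n - m + 1))
--     for j, c in enumerate(sub_seq):
--         candidates = [i for i in candidates if main_seq[i + j] == c]
--         if not candidates:
--             return -1
--     return candidates[-1]
-- ===== Notes on version B (the rewrite author's own statement) =====
-- stated objective: alternative
-- what changed: B replaces A's row-wise sliding-window slice comparison by column-wise candidate elimination: it starts from the list of all possible start positions and, for each pattern position j, filters out the starts whose main_seq[i+j] disagrees, returning the last surviving start (early -1 when no candidate survives).
import Mathlib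
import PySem

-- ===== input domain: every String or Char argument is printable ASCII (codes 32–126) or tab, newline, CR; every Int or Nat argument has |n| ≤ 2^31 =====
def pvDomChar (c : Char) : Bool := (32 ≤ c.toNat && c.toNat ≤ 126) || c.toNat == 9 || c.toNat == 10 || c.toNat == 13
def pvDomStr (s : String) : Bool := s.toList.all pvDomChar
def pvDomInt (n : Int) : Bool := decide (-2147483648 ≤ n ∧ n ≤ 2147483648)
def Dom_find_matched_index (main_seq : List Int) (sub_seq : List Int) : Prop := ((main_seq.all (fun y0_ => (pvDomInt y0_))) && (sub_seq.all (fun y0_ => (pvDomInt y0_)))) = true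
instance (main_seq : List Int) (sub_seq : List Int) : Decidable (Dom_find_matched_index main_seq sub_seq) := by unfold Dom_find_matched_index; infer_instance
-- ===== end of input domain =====

-- B replaces A's sliding-window slice comparison by column-wise candidate elimination (filter the surviving start positions per pattern offset); return-value equivalence on nonempty inputs.


-- ===== PORT A =====
-- forward scan over range(0, n-m+1) keeping the last matching start index
def find_matched_index (main_seq : List Int) (sub_seq : List Int) : Int :=
  if (sub_seq.length : Int) > (main_seq.length : Int) then -1
  else
    (PySem.List.pyRange 0 ((main_seq.length : Int) - (sub_seq.length : Int) + 1) 1).foldl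
      (fun last i =>
        if PySem.List.slice main_seq (some i) (some (i + (sub_seq.length : Int))) = sub_seq then i
        else last)
      (-1)

-- ===== PORT B =====
-- the loop `for j, c in enumerate(sub_seq): candidates = [i for i in candidates if main_seq[i+j] == c];
-- if not candidates: return -1` followed by `return candidates[-1]`.  `candidates[-1]` is ported as
-- pyGet? (-1) with a -1 default for the none case (IndexError), which is unreachable under Pre_:
-- the initial candidate list is nonempty and an emptied list returns -1 inside the loop.
def fmiLoop (main_seq : List Int) (cands : List Int) : List (Int × Int) → Int
  | [] => (PySem.List.pyGet? cands (-1)).getD (-1)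
  | (j, c) :: rest =>
      let cands' := cands.filter (fun i => PySem.List.pyGet? main_seq (i + j) == some c)
      if cands'.isEmpty then -1 else fmiLoop main_seq cands' rest

def find_matched_index_alt (main_seq : List Int) (sub_seq : List Int) : Int :=
  if (sub_seq.length : Int) > (main_seq.length : Int) then -1
  else
    fmiLoop main_seq
      (PySem.List.pyRange 0 ((main_seq.length : Int) - (sub_seq.length : Int) + 1) 1)
      (PySem.List.enumerate sub_seq 0)

-- ===== PRECONDITION & SPEC =====
-- Pre_ excludes exactly the inputs on which A's assert raises (empty main_seq or empty sub_seq).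
def Pre_find_matched_index (main_seq : List Int) (sub_seq : List Int) : Prop :=
  main_seq ≠ [] ∧ sub_seq ≠ []
instance (main_seq : List Int) (sub_seq : List Int) : Decidable (Pre_find_matched_index main_seq sub_seq) := by unfold Pre_find_matched_index; infer_instance

def pvWitness_find_matched_index : List Int × List Int := ([1, 2, 1], [1])

def Spec_find_matched_index (main_seq : List Int) (sub_seq : List Int) (out : Int) : Prop := out = find_matched_index_alt main_seq sub_seq
instance (main_seq : List Int) (sub_seq : List Int) (out : Int) : Decidable (Spec_find_matched_index main_seq sub_seq out) := by unfold Spec_find_matched_index; infer_instance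

-- ===== CLAIM (what is proved, stated in full; the proofs are below) =====
def Claim_equal_find_matched_index : Prop := ∀ (main_seq : List Int) (sub_seq : List Int), Dom_find_matched_index main_seq sub_seq → Pre_find_matched_index main_seq sub_seq → Spec_find_matched_index main_seq sub_seq (find_matched_index main_seq sub_seq)

-- ===== LEMMAS AND PROOFS =====

-- xs[-1] read through pyGet? is getLast?
theorem pyGet?_neg_one_getLast (l : List Int) :
    PySem.List.pyGet? l (-1) = l.getLast? := by
  cases l with
  | nil => rfl
  | cons x xs =>
      rw [PySem.List.pyGet?_neg_ofNat (x::xs) 1 (by norm_num) (by simp),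
          List.getLast?_eq_getElem?]

-- A's accumulator fold keeps the LAST element of the filtered candidate list (default acc).
theorem foldl_last_eq_filter_getLast (q : Int → Prop) [DecidablePred q] :
    ∀ (l : List Int) (acc : Int),
      l.foldl (fun last i => if q i then i else last) acc =
        ((l.filter (fun i => decide (q i))).getLast?).getD acc := by
  intro l
  induction l with
  | nil => intro acc; simp
  | cons x l ih =>
      intro acc
      by_cases h : q x
      · simp only [List.foldl_cons, if_pos h, List.filter_cons, decide_eq_true h, ih]
        cases hf : l.filter (fun i => decide (q i)) with
        | nil => simp
        | cons y t =>
            rw [List.getLast?_eq_getElem?, List.getLast?_eq_getElem?]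
            simp
            rfl
      · simp [h, ih]

-- B's loop computes the last survivor of filtering by all remaining (offset, value) pairs.
theorem fmiLoop_eq_filter (main_seq : List Int) :
    ∀ (pairs : List (Int × Int)) (cands : List Int),
      fmiLoop main_seq cands pairs =
        ((cands.filter (fun i =>
            pairs.all (fun jc => PySem.List.pyGet? main_seq (i + jc.1) == some jc.2))).getLast?).getD (-1) := by
  intro pairs
  induction pairs with
  | nil =>
      intro cands
      simp [fmiLoop, pyGet?_neg_one_getLast]
  | cons jc rest ih =>
      intro cands
      obtain ⟨j, c⟩ := jc
      show (if (cands.filter (fun i => PySem.List.pyGet? main_seq (i + j) == some c)).isEmpty then -1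
            else fmiLoop main_seq (cands.filter (fun i => PySem.List.pyGet? main_seq (i + j) == some c)) rest) = _
      by_cases he : (cands.filter (fun i => PySem.List.pyGet? main_seq (i + j) == some c)).isEmpty
      · rw [if_pos he]
        have : cands.filter (fun i =>
            ((j, c) :: rest).all (fun jc => PySem.List.pyGet? main_seq (i + jc.1) == some jc.2)) = [] := by
          rw [List.isEmpty_iff] at he
          rw [List.filter_eq_nil_iff]
          intro a ha hall
          have : a ∈ cands.filter (fun i => PySem.List.pyGet? main_seq (i + j) == some c) := by
            rw [List.mem_filter]
            simp only [List.all_cons, Bool.and_eq_true] at hall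
            exact ⟨ha, hall.1⟩
          simp [he] at this
        rw [this]; rfl
      · rw [if_neg he, ih, List.filter_filter]
        congr 2
        apply List.filter_congr
        intro a _
        simp only [List.all_cons]
        exact Bool.and_comm _ _

-- pointwise agreement at every enumerated offset = equality of the window with sub_seq
theorem all_enum_eq_window (main_seq : List Int) :
    ∀ (sub_seq : List Int) (i s : Int), 0 ≤ i + s →
      (i + s) + (sub_seq.length : Int) ≤ (main_seq.length : Int) →
      ((PySem.List.enumerate sub_seq s).all
          (fun jc => PySem.List.pyGet? main_seq (i + jc.1) == some jc.2) = true ↔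
        (main_seq.drop (i + s).toNat).take sub_seq.length = sub_seq) := by
  intro sub_seq
  induction sub_seq with
  | nil => intro i s h0 hlen; simp [PySem.List.enumerate_nil]
  | cons c rest ih =>
      intro i s h0 hlen
      have ht : (i + s).toNat < main_seq.length := by
        simp only [List.length_cons] at hlen; omega
      have h1 : PySem.List.pyGet? main_seq (i + s) = main_seq[(i + s).toNat]? := by
        rw [show i + s = ((i + s).toNat : Int) from by omega]
        exact PySem.List.pyGet?_natCast ..
      have hget : PySem.List.pyGet? main_seq (i + s) = some main_seq[(i + s).toNat] :=
        h1.trans (List.getElem?_eq_getElem ht)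
      have hdrop : main_seq.drop (i + s).toNat =
          main_seq[(i + s).toNat] :: main_seq.drop ((i + s).toNat + 1) := by
        exact (List.drop_eq_getElem_cons ht)
      rw [PySem.List.enumerate_cons, List.all_cons]
      have hrest := ih i (s + 1) (by omega) (by simp only [List.length_cons] at hlen; omega)
      have harith : i + (s + 1) = i + s + 1 := by ring
      have htn : (i + s + 1).toNat = (i + s).toNat + 1 := by omega
      rw [harith, htn] at hrest
      rw [Bool.and_eq_true, hrest, hdrop]
      simp only [List.length_cons, List.take_succ_cons, List.cons.injEq, hget]
      constructor
      · rintro ⟨h1, h2⟩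
        simp at h1
        exact ⟨h1.symm ▸ rfl, h2⟩
      · rintro ⟨h1, h2⟩
        exact ⟨by simp [h1], h2⟩

-- ===== VERDICT (by name: the statement is the Claim_ definition above) =====
theorem find_matched_index_spec : Claim_equal_find_matched_index := by
  intro main_seq sub_seq _ _
  unfold Spec_find_matched_index find_matched_index find_matched_index_alt
  by_cases hgt : (sub_seq.length : Int) > (main_seq.length : Int)
  · rw [if_pos hgt, if_pos hgt]
  · rw [if_neg hgt, if_neg hgt, fmiLoop_eq_filter,
        foldl_last_eq_filter_getLast
          (fun i => PySem.List.slice main_seq (some i) (some (i + (sub_seq.length : Int))) = sub_seq)]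
    congr 2
    apply List.filter_congr
    intro i hi
    rw [PySem.List.mem_pyRange_one] at hi
    rw [Bool.eq_iff_iff]
    simp only [decide_eq_true_eq]
    have hslice : PySem.List.slice main_seq (some i) (some (i + (sub_seq.length : Int))) =
        (main_seq.drop i.toNat).take sub_seq.length := by
      rw [PySem.List.slice_toNat _ hi.1 (by omega)]
      congr 1
      omega
    rw [hslice]
    have := all_enum_eq_window main_seq sub_seq i 0 (by omega) (by omega)
    rw [show i + (0:Int) = i from by ring] at this
    exact this.symm
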